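-- pv_equiv track=rewrite | github.com/jnclt/hackerrank | componentsInGraph.py | componentsInGraph
-- ===== SOURCE A (Python) =====
-- from queue import deque
--
-- def componentsInGraph(gb):
--     neighbours = {}
--     for edge in gb:
--         neighbours.setdefault(edge[0], set()).add(edge[1])
--         neighbours.setdefault(edge[1], set()).add(edge[0])
--
--     components = []
--     to_visit = set(neighbours.keys())
--     while to_visit:
--         nodes = deque([to_visit.pop()])
--         component = set()
--         while nodes:
--             node = nodes.popleft()
--             component.add(node)
--             to_visit.discard(node)
--             nodes.extend(neighbours[node] & to_visit)
--         components.append(component)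
--
--     sizes = [len(component) for component in components]
--     return [min(sizes), max(sizes)]
-- ===== SOURCE B (Python) =====
-- def componentsInGraph(gb):
--     # Label-merging union-find: comp_of maps node -> component id, members maps id -> node set.
--     comp_of = {}
--     members = {}
--     fresh = 0
--     for edge in gb:
--         a, b = edge[0], edge[1]
--         ca = comp_of.get(a)
--         cb = comp_of.get(b)
--         if ca is None and cb is None:
--             comp_of[a] = fresh
--             comp_of[b] = fresh
--             members[fresh] = {a, b}
--             fresh += 1
--         elif ca is None:
--             comp_of[a] = cb
--             members[cb].add(a)
--         elif cb is None:
--             comp_of[b] = ca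
--             members[ca].add(b)
--         elif ca != cb:
--             for x in members[cb]:
--                 comp_of[x] = ca
--             members[ca] |= members[cb]
--             del members[cb]
--     sizes = [len(c) for c in members.values()]
--     return [min(sizes), max(sizes)]
-- ===== Notes on version B (the rewrite author's own statement) =====
-- stated objective: alternative
-- what changed: Replaces the adjacency-dict + BFS (deque) component sweep by an edge-driven label-merging union-find: a node->component-id dict and an id->member-set dict are updated per edge, merging the two member sets when an edge joins distinct components; sizes are read off the member sets.
import Mathlib
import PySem

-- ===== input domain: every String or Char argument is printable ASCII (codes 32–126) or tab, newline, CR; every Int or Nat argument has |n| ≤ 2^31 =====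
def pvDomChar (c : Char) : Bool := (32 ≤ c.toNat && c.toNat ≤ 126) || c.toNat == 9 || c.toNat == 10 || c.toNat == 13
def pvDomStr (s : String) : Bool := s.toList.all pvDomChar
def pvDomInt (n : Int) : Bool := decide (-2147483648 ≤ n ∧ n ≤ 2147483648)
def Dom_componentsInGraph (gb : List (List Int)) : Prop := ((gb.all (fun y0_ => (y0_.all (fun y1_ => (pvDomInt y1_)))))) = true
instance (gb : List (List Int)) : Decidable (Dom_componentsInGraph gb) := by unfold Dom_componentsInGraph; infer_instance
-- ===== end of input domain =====

-- B replaces A's adjacency-dict + BFS component sweep by an edge-driven label-merging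
-- union-find (node→id and id→member-set dicts, merging member sets per edge): a genuinely
-- different algorithm of similar cost (objective: alternative, not claimed faster).

-- ===== PORT A =====
-- [min(sizes), max(sizes)] — shared tail of both Pythons (min/max builtins);
-- the (none, none) branch is unreachable under Pre_ (Python raises ValueError there).
def pyMinMax (sizes : List Int) : List Int :=
  match PySem.List.min? sizes (fun x => x), PySem.List.max? sizes (fun x => x) with
  | some m, some M => [m, M]
  | _, _ => []

-- neighbours = {}; for edge in gb: setdefault both endpoints and add the other
def cigNbrsStep (d : PySem.Dict Int (PySem.Set Int)) (e : List Int) : PySem.Dict Int (PySem.Set Int) :=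
  match PySem.List.pyGet? e 0, PySem.List.pyGet? e 1 with
  | some a, some b =>
    let d1 := d.insert a (PySem.Set.add (d.getD a PySem.Set.empty) b)
    d1.insert b (PySem.Set.add (d1.getD b PySem.Set.empty) a)
  | _, _ => d

def cigNbrs (gb : List (List Int)) : PySem.Dict Int (PySem.Set Int) :=
  gb.foldl cigNbrsStep PySem.Dict.empty

def cigBFS (nbrs : PySem.Dict Int (PySem.Set Int)) :
    List Int → PySem.Set Int → PySem.Set Int → PySem.Set Int × PySem.Set Int
  | [], comp, tv => (comp, tv)
  | node :: rest, comp, tv =>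
    cigBFS nbrs
      (rest ++ PySem.Set.inter (nbrs.getD node PySem.Set.empty) (PySem.Set.discard tv node))
      (PySem.Set.add comp node) (PySem.Set.discard tv node)
termination_by q comp tv => (tv.length, (q.filter (fun x => !(PySem.Set.contains tv x))).length)
decreasing_by
  by_cases h : PySem.Set.contains tv node = true
  · apply Prod.Lex.left
    simp only [PySem.Set.discard.eq_1]
    apply List.length_filter_lt_length_iff_exists.mpr
    refine ⟨node, ?_, by simp⟩
    have := (PySem.Set.contains_iff tv node).mp h
    exact this
  · have htv : PySem.Set.discard tv node = tv := by
      simp only [PySem.Set.discard.eq_1]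
      apply List.filter_eq_self.mpr
      intro x hx
      simp only [Bool.not_eq_eq_eq_not, Bool.not_true, beq_eq_false_iff_ne, ne_eq]
      rintro rfl
      exact h ((PySem.Set.contains_iff tv x).mpr hx)
    rw [htv]
    apply Prod.Lex.right
    have hfilt : (rest ++ PySem.Set.inter (nbrs.getD node PySem.Set.empty) tv).filter
        (fun x => !(PySem.Set.contains tv x)) = rest.filter (fun x => !(PySem.Set.contains tv x)) := by
      rw [List.filter_append]
      have : (PySem.Set.inter (nbrs.getD node PySem.Set.empty) tv).filter
          (fun x => !(PySem.Set.contains tv x)) = [] := by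
        apply List.filter_eq_nil_iff.mpr
        intro x hx
        have hxtv : x ∈ tv := ((PySem.Set.mem_inter _ _ x).mp hx).2
        simp
        exact hxtv
      rw [this, List.append_nil]
    rw [hfilt]
    have hnode : node ∉ tv := fun hm => h ((PySem.Set.contains_iff tv node).mpr hm)
    have : (node :: rest).filter (fun x => !(PySem.Set.contains tv x))
        = node :: rest.filter (fun x => !(PySem.Set.contains tv x)) := by
      rw [List.filter_cons]
      simp [hnode]
    rw [this]
    simp

-- the final to_visit of the BFS never grows (needed for cigOuter's termination)
theorem cigBFS_snd_length_le (nbrs : PySem.Dict Int (PySem.Set Int)) :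
    ∀ (q : List Int) (comp tv : PySem.Set Int), (cigBFS nbrs q comp tv).2.length ≤ tv.length := by
  intro q comp tv
  fun_induction cigBFS nbrs q comp tv with
  | case1 comp tv => simp [cigBFS]
  | case2 node rest comp tv ih =>
    refine le_trans ih ?_
    simp only [PySem.Set.discard.eq_1]
    exact List.length_filter_le _ _

-- while to_visit: pop a node, BFS its component, append it
def cigOuter (nbrs : PySem.Dict Int (PySem.Set Int)) :
    PySem.Set Int → List (PySem.Set Int) → List (PySem.Set Int)
  | [], comps => comps
  | s :: tvRest, comps =>
    let r := cigBFS nbrs [s] PySem.Set.empty tvRest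
    cigOuter nbrs r.2 (comps ++ [r.1])
termination_by tv _ => tv.length
decreasing_by
  exact Nat.lt_succ_of_le (cigBFS_snd_length_le nbrs [s] PySem.Set.empty tvRest)

def componentsInGraph (gb : List (List Int)) : List Int :=
  let nbrs := cigNbrs gb
  let comps := cigOuter nbrs (PySem.Set.ofList nbrs.keys) []
  pyMinMax (comps.map (fun c => PySem.Set.len c))

-- ===== PORT B =====
-- one edge of the label-merging loop: comp_of : node → component id, mems : id → member set
def cigAltStep (st : PySem.Dict Int Int × PySem.Dict Int (PySem.Set Int) × Int)
    (e : List Int) : PySem.Dict Int Int × PySem.Dict Int (PySem.Set Int) × Int :=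
  match PySem.List.pyGet? e 0, PySem.List.pyGet? e 1 with
  | some a, some b =>
    match st.1.get? a, st.1.get? b with
    | none, none =>
      ((st.1.insert a st.2.2).insert b st.2.2,
       st.2.1.insert st.2.2 (PySem.Set.add (PySem.Set.add PySem.Set.empty a) b),
       st.2.2 + 1)
    | none, some cb =>
      (st.1.insert a cb, st.2.1.modify cb PySem.Set.empty (fun s => PySem.Set.add s a), st.2.2)
    | some ca, none =>
      (st.1.insert b ca, st.2.1.modify ca PySem.Set.empty (fun s => PySem.Set.add s b), st.2.2)
    | some ca, some cb =>
      if ca = cb then st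
      else
        ((st.2.1.getD cb PySem.Set.empty).foldl (fun d x => d.insert x ca) st.1,
         (st.2.1.modify ca PySem.Set.empty
            (fun s => PySem.Set.union s (st.2.1.getD cb PySem.Set.empty))).erase cb,
         st.2.2)
  | _, _ => st

def componentsInGraph_alt (gb : List (List Int)) : List Int :=
  let st := gb.foldl cigAltStep (PySem.Dict.empty, PySem.Dict.empty, 0)
  pyMinMax (st.2.1.values.map (fun c => PySem.Set.len c))

-- ===== PRECONDITION & SPEC =====
-- Pre_ excludes exactly the inputs where Python A raises: the empty edge list
-- (min of an empty list, ValueError) and any edge with fewer than two entries (IndexError).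
def Pre_componentsInGraph (gb : List (List Int)) : Prop :=
  gb ≠ [] ∧ ∀ e ∈ gb, 2 ≤ e.length
instance (gb : List (List Int)) : Decidable (Pre_componentsInGraph gb) := by
  unfold Pre_componentsInGraph; infer_instance
def pvWitness_componentsInGraph : List (List Int) := [[1, 2], [2, 3], [4, 4]]

def Spec_componentsInGraph (gb : List (List Int)) (out : List Int) : Prop := out = componentsInGraph_alt gb
instance (gb : List (List Int)) (out : List Int) : Decidable (Spec_componentsInGraph gb out) := by unfold Spec_componentsInGraph; infer_instance

-- ===== CLAIM (what is proved, stated in full; the proofs are below) =====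
def Claim_equal_componentsInGraph : Prop := ∀ (gb : List (List Int)), Dom_componentsInGraph gb → Pre_componentsInGraph gb → Spec_componentsInGraph gb (componentsInGraph gb)

-- ===== LEMMAS AND PROOFS =====

-- the edges both ports actually process: pairs (e[0], e[1]) of edges with two entries
def cigEdges (gb : List (List Int)) : List (Int × Int) :=
  gb.filterMap (fun e =>
    match PySem.List.pyGet? e 0, PySem.List.pyGet? e 1 with
    | some a, some b => some (a, b)
    | _, _ => none)

def EAdj (E : List (Int × Int)) (x y : Int) : Prop := (x, y) ∈ E ∨ (y, x) ∈ E
def EConn (E : List (Int × Int)) : Int → Int → Prop := Relation.ReflTransGen (EAdj E)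
def ENode (E : List (Int × Int)) (x : Int) : Prop := ∃ y, EAdj E x y

-- a list of sets that is THE partition of the nodes of E into connected components
def GoodPart (E : List (Int × Int)) (P : List (List Int)) : Prop :=
  (∀ C ∈ P, C ≠ [] ∧ C.Nodup ∧ (∀ x ∈ C, ENode E x) ∧
    (∀ x ∈ C, ∀ y ∈ C, EConn E x y) ∧ (∀ x ∈ C, ∀ y, EAdj E x y → y ∈ C)) ∧
  (∀ x, ENode E x → ∃ C ∈ P, x ∈ C) ∧
  P.Pairwise (fun C D => ∀ x ∈ C, x ∉ D)

theorem conn_mem {E : List (Int × Int)} {C : List Int} (hcl : ∀ x ∈ C, ∀ y, EAdj E x y → y ∈ C)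
    {x y : Int} (hx : x ∈ C) (h : EConn E x y) : y ∈ C := by
  induction h with
  | refl => exact hx
  | tail _ hadj ih => exact hcl _ ih _ hadj

theorem goodpart_match {E : List (Int × Int)} {P Q : List (List Int)}
    (hP : GoodPart E P) (hQ : GoodPart E Q) {C : List Int} (hC : C ∈ P) :
    ∃ D ∈ Q, C.toFinset = D.toFinset := by
  obtain ⟨hcomp, _, _⟩ := hP
  obtain ⟨hcompQ, hcovQ, _⟩ := hQ
  obtain ⟨hne, _, hnodes, hconn, hcl⟩ := hcomp C hC
  obtain ⟨x, hx⟩ := List.exists_mem_of_ne_nil C hne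
  obtain ⟨D, hD, hxD⟩ := hcovQ x (hnodes x hx)
  refine ⟨D, hD, ?_⟩
  obtain ⟨_, _, _, hconnD, hclD⟩ := hcompQ D hD
  ext y
  simp only [List.mem_toFinset]
  constructor
  · intro hy; exact conn_mem hclD hxD (hconn x hx y hy)
  · intro hy; exact conn_mem hcl hx (hconnD x hxD y hy)

theorem goodpart_sizes_perm (E : List (Int × Int)) (P Q : List (List Int))
    (hP : GoodPart E P) (hQ : GoodPart E Q) :
    (P.map (fun C => (C.length : Int))).Perm (Q.map (fun C => (C.length : Int))) := by
  have hnd : ∀ (R : List (List Int)), GoodPart E R → (R.map List.toFinset).Nodup := by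
    intro R hR
    have := hR.2.2
    rw [List.Nodup, List.pairwise_map]
    refine this.imp_of_mem ?_
    intro C D hCm hDm hdisj heq
    obtain ⟨hne, _, _, _, _⟩ := hR.1 C hCm
    obtain ⟨x, hx⟩ := List.exists_mem_of_ne_nil C hne
    have : x ∈ D := by
      have : x ∈ D.toFinset := heq ▸ List.mem_toFinset.mpr hx
      exact List.mem_toFinset.mp this
    exact hdisj x hx this
  have hfin : (P.map List.toFinset).toFinset = (Q.map List.toFinset).toFinset := by
    ext S
    simp only [List.mem_toFinset, List.mem_map]
    constructor
    · rintro ⟨C, hC, rfl⟩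
      obtain ⟨D, hD, h⟩ := goodpart_match hP hQ hC
      exact ⟨D, hD, h.symm⟩
    · rintro ⟨D, hD, rfl⟩
      obtain ⟨C, hC, h⟩ := goodpart_match hQ hP hD
      exact ⟨C, hC, h.symm⟩
  have hperm := List.perm_of_nodup_nodup_toFinset_eq (hnd P hP) (hnd Q hQ) hfin
  have hmap : ∀ (R : List (List Int)), GoodPart E R →
      R.map (fun C => (C.length : Int)) = (R.map List.toFinset).map (fun S => (S.card : Int)) := by
    intro R hR
    rw [List.map_map]
    apply List.map_congr_left
    intro C hC
    obtain ⟨_, hnodup, _, _, _⟩ := hR.1 C hC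
    simp [List.toFinset_card_of_nodup hnodup]
  rw [hmap P hP, hmap Q hQ]
  exact hperm.map _

theorem cig_min?_perm (l l' : List Int) (h : l.Perm l') :
    PySem.List.min? l (fun x => x) = PySem.List.min? l' (fun x => x) := by
  cases hm : PySem.List.min? l (fun x => x) with
  | none =>
    rw [(PySem.List.min?_eq_none_iff l (fun x => x)).mp hm] at h
    exact ((PySem.List.min?_eq_none_iff l' (fun x => x)).mpr h.symm.eq_nil).symm
  | some m =>
    cases hm' : PySem.List.min? l' (fun x => x) with
    | none =>
      rw [(PySem.List.min?_eq_none_iff l' (fun x => x)).mp hm'] at h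
      rw [h.eq_nil, (PySem.List.min?_eq_none_iff [] (fun x => x)).mpr rfl] at hm; cases hm
    | some m' =>
      have h3 : m ≤ m' := PySem.List.min?_isMin hm m' (h.mem_iff.mpr (PySem.List.min?_mem hm'))
      have h4 : m' ≤ m := PySem.List.min?_isMin hm' m (h.mem_iff.mp (PySem.List.min?_mem hm))
      exact congrArg some (le_antisymm h3 h4)

theorem cig_max?_perm (l l' : List Int) (h : l.Perm l') :
    PySem.List.max? l (fun x => x) = PySem.List.max? l' (fun x => x) := by
  cases hm : PySem.List.max? l (fun x => x) with
  | none =>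
    rw [(PySem.List.max?_eq_none_iff l (fun x => x)).mp hm] at h
    exact ((PySem.List.max?_eq_none_iff l' (fun x => x)).mpr h.symm.eq_nil).symm
  | some m =>
    cases hm' : PySem.List.max? l' (fun x => x) with
    | none =>
      rw [(PySem.List.max?_eq_none_iff l' (fun x => x)).mp hm'] at h
      rw [h.eq_nil, (PySem.List.max?_eq_none_iff [] (fun x => x)).mpr rfl] at hm; cases hm
    | some m' =>
      have h3 : m' ≤ m := PySem.List.max?_isMax hm m' (h.mem_iff.mpr (PySem.List.max?_mem hm'))
      have h4 : m ≤ m' := PySem.List.max?_isMax hm' m (h.mem_iff.mp (PySem.List.max?_mem hm))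
      exact congrArg some (le_antisymm h4 h3)

theorem pyMinMax_perm (l l' : List Int) (h : l.Perm l') : pyMinMax l = pyMinMax l' := by
  unfold pyMinMax
  rw [cig_min?_perm l l' h, cig_max?_perm l l' h]

theorem EAdj_cons {a b x y : Int} {E : List (Int × Int)} :
    EAdj ((a, b) :: E) x y ↔ (x = a ∧ y = b) ∨ (x = b ∧ y = a) ∨ EAdj E x y := by
  simp only [EAdj, List.mem_cons, Prod.mk.injEq]
  tauto

theorem ENode_cons {a b x : Int} {E : List (Int × Int)} :
    ENode ((a, b) :: E) x ↔ x = a ∨ x = b ∨ ENode E x := by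
  constructor
  · rintro ⟨y, hy⟩
    rcases EAdj_cons.mp hy with ⟨rfl, _⟩ | ⟨rfl, _⟩ | h
    · exact Or.inl rfl
    · exact Or.inr (Or.inl rfl)
    · exact Or.inr (Or.inr ⟨y, h⟩)
  · rintro (rfl | rfl | ⟨y, hy⟩)
    · exact ⟨b, EAdj_cons.mpr (Or.inl ⟨rfl, rfl⟩)⟩
    · exact ⟨a, EAdj_cons.mpr (Or.inr (Or.inl ⟨rfl, rfl⟩))⟩
    · exact ⟨y, EAdj_cons.mpr (Or.inr (Or.inr hy))⟩

theorem cigNbrs_fold_getD (gb : List (List Int)) :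
    ∀ (d : PySem.Dict Int (PySem.Set Int)) (x y : Int),
    (y ∈ (gb.foldl cigNbrsStep d).getD x PySem.Set.empty ↔
      y ∈ d.getD x PySem.Set.empty ∨ EAdj (cigEdges gb) x y) := by
  induction gb with
  | nil => intro d x y; simp [cigEdges, EAdj]
  | cons e gb ih =>
    intro d x y
    rw [List.foldl_cons]
    rcases he : PySem.List.pyGet? e 0 with _ | a <;> rcases he' : PySem.List.pyGet? e 1 with _ | b
    all_goals simp only [cigNbrsStep, he, he']
    · rw [ih d x y]; simp [cigEdges, List.filterMap_cons, he, he']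
    · rw [ih d x y]; simp [cigEdges, List.filterMap_cons, he, he']
    · rw [ih d x y]; simp [cigEdges, List.filterMap_cons, he, he']
    · rw [ih _ x y]
      have hE : cigEdges (e :: gb) = (a, b) :: cigEdges gb := by
        simp [cigEdges, List.filterMap_cons, he, he']
      rw [hE]
      rw [PySem.Dict.getD_insert, PySem.Dict.getD_insert, PySem.Dict.getD_insert]
      rw [EAdj_cons]
      by_cases hxa : x = a <;> by_cases hxb : x = b <;> by_cases hab : a = b <;>
        simp_all [PySem.Set.mem_add] <;> tauto

theorem cigNbrs_fold_keys (gb : List (List Int)) :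
    ∀ (d : PySem.Dict Int (PySem.Set Int)) (x : Int),
    (x ∈ (gb.foldl cigNbrsStep d).keys ↔ x ∈ d.keys ∨ ENode (cigEdges gb) x) := by
  induction gb with
  | nil => intro d x; simp [cigEdges, ENode, EAdj]
  | cons e gb ih =>
    intro d x
    rw [List.foldl_cons]
    rcases he : PySem.List.pyGet? e 0 with _ | a <;> rcases he' : PySem.List.pyGet? e 1 with _ | b
    all_goals simp only [cigNbrsStep, he, he']
    · rw [ih d x]; simp [cigEdges, List.filterMap_cons, he, he', ENode, EAdj]
    · rw [ih d x]; simp [cigEdges, List.filterMap_cons, he, he', ENode, EAdj]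
    · rw [ih d x]; simp [cigEdges, List.filterMap_cons, he, he', ENode, EAdj]
    · rw [ih _ x]
      have hE : cigEdges (e :: gb) = (a, b) :: cigEdges gb := by
        simp [cigEdges, List.filterMap_cons, he, he']
      rw [hE, ENode_cons, PySem.Dict.mem_keys_insert, PySem.Dict.mem_keys_insert]
      tauto

theorem cigNbrs_getD (gb : List (List Int)) (x y : Int) :
    y ∈ (cigNbrs gb).getD x PySem.Set.empty ↔ EAdj (cigEdges gb) x y := by
  rw [cigNbrs, cigNbrs_fold_getD]
  simp [PySem.Dict.getD_empty]

theorem cigNbrs_keys (gb : List (List Int)) (x : Int) :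
    x ∈ (cigNbrs gb).keys ↔ ENode (cigEdges gb) x := by
  rw [cigNbrs, cigNbrs_fold_keys]
  simp [PySem.Dict.keys_empty]

theorem cig_filter_discard (tv : List Int) (node : Int) (cf : List Int) (h : node ∈ cf) :
    (PySem.Set.discard tv node).filter (fun x => !(PySem.Set.contains cf x))
      = tv.filter (fun x => !(PySem.Set.contains cf x)) := by
  simp only [PySem.Set.discard.eq_1, List.filter_filter]
  apply List.filter_congr
  intro x hx
  by_cases hxn : x = node
  · have hxm : x ∈ cf := hxn.symm ▸ h
    simp [hxm]
  · have hbx : (x == node) = false := by simp [hxn]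
    simp [hbx]

theorem cig_bfs_spec (E : List (Int × Int)) (nbrs : PySem.Dict Int (PySem.Set Int))
    (hN : ∀ x y, y ∈ nbrs.getD x PySem.Set.empty ↔ EAdj E x y) (s : Int)
    (q : List Int) (comp tv : PySem.Set Int) :
    (∀ x ∈ q, EConn E s x) → (∀ x ∈ comp, EConn E s x) →
    (∀ c ∈ comp, ∀ y, EAdj E c y → y ∈ comp ∨ y ∈ q ∨ y ∉ tv) →
    (∀ x ∈ tv, x ∉ comp) → tv.Nodup → comp.Nodup →
    (∀ x ∈ comp, x ∈ (cigBFS nbrs q comp tv).1) ∧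
    (∀ x ∈ q, x ∈ (cigBFS nbrs q comp tv).1) ∧
    (∀ x ∈ (cigBFS nbrs q comp tv).1, EConn E s x) ∧
    (∀ x ∈ (cigBFS nbrs q comp tv).1, x ∈ comp ∨ x ∈ q ∨ x ∈ tv) ∧
    (cigBFS nbrs q comp tv).2
      = tv.filter (fun x => !(PySem.Set.contains (cigBFS nbrs q comp tv).1 x)) ∧
    (cigBFS nbrs q comp tv).1.Nodup ∧
    (∀ c ∈ (cigBFS nbrs q comp tv).1, ∀ y, EAdj E c y → y ∈ (cigBFS nbrs q comp tv).1 ∨ y ∉ tv) := by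
  fun_induction cigBFS nbrs q comp tv with
  | case1 comp tv =>
    intro _ hcomp hfront hdisj _ hcompnd
    simp only [cigBFS]
    refine ⟨fun x hx => hx, by simp, hcomp, fun x hx => Or.inl hx, ?_, hcompnd, ?_⟩
    · symm; apply List.filter_eq_self.mpr
      intro x hx
      simp only [Bool.not_eq_eq_eq_not, Bool.not_true, Bool.not_eq_true]
      cases hc : PySem.Set.contains comp x with
      | true => exact absurd ((PySem.Set.contains_iff comp x).mp hc) (hdisj x hx)
      | false => rfl
    · intro c hc y hadj
      rcases hfront c hc y hadj with h | h | h
      · exact Or.inl h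
      · cases h
      · exact Or.inr h
  | case2 node rest comp tv ih =>
    intro hq hcomp hfront hdisj htvnd hcompnd
    have hnodeconn : EConn E s node := hq node List.mem_cons_self
    have hmemtv' : ∀ x, x ∈ PySem.Set.discard tv node ↔ x ∈ tv ∧ x ≠ node :=
      fun x => PySem.Set.mem_discard tv node x
    have hmemcomp' : ∀ x, x ∈ PySem.Set.add comp node ↔ x ∈ comp ∨ x = node :=
      fun x => PySem.Set.mem_add comp node x
    -- establish hypotheses of ih
    have h1 : ∀ x ∈ rest ++ PySem.Set.inter (nbrs.getD node PySem.Set.empty) (PySem.Set.discard tv node),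
        EConn E s x := by
      intro x hx
      rcases List.mem_append.mp hx with hx | hx
      · exact hq x (List.mem_cons_of_mem _ hx)
      · have := ((PySem.Set.mem_inter _ _ x).mp hx).1
        exact hnodeconn.tail ((hN node x).mp this)
    have h2 : ∀ x ∈ PySem.Set.add comp node, EConn E s x := by
      intro x hx
      rcases (hmemcomp' x).mp hx with hx | rfl
      · exact hcomp x hx
      · exact hnodeconn
    have h3 : ∀ c ∈ PySem.Set.add comp node, ∀ y, EAdj E c y →
        y ∈ PySem.Set.add comp node ∨
        y ∈ rest ++ PySem.Set.inter (nbrs.getD node PySem.Set.empty) (PySem.Set.discard tv node) ∨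
        y ∉ PySem.Set.discard tv node := by
      intro c hc y hadj
      rcases (hmemcomp' c).mp hc with hc | hceq
      case _ =>
        rcases hfront c hc y hadj with h | h | h
        · exact Or.inl ((hmemcomp' y).mpr (Or.inl h))
        · rcases List.mem_cons.mp h with rfl | h
          · exact Or.inl ((hmemcomp' y).mpr (Or.inr rfl))
          · exact Or.inr (Or.inl (List.mem_append.mpr (Or.inl h)))
        · exact Or.inr (Or.inr (fun hy => h ((hmemtv' y).mp hy).1))
      case _ =>
        by_cases hy : y ∈ PySem.Set.discard tv node
        · refine Or.inr (Or.inl (List.mem_append.mpr (Or.inr ?_)))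
          exact (PySem.Set.mem_inter _ _ y).mpr ⟨(hN node y).mpr (hceq ▸ hadj), hy⟩
        · exact Or.inr (Or.inr hy)
    have h4 : ∀ x ∈ PySem.Set.discard tv node, x ∉ PySem.Set.add comp node := by
      intro x hx hmem
      obtain ⟨hxtv, hxne⟩ := (hmemtv' x).mp hx
      rcases (hmemcomp' x).mp hmem with h | rfl
      · exact hdisj x hxtv h
      · exact hxne rfl
    have h5 : (PySem.Set.discard tv node).Nodup := PySem.Set.nodup_discard tv node htvnd
    have h6 : (PySem.Set.add comp node).Nodup := PySem.Set.nodup_add comp node hcompnd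
    obtain ⟨i1, i2, i3, i4, i5, i6, i7⟩ := ih h1 h2 h3 h4 h5 h6
    have hnodecf : node ∈ (cigBFS nbrs
        (rest ++ PySem.Set.inter (nbrs.getD node PySem.Set.empty) (PySem.Set.discard tv node))
        (PySem.Set.add comp node) (PySem.Set.discard tv node)).1 :=
      i1 node ((hmemcomp' node).mpr (Or.inr rfl))
    refine ⟨?_, ?_, i3, ?_, ?_, i6, ?_⟩
    · intro x hx; exact i1 x ((hmemcomp' x).mpr (Or.inl hx))
    · intro x hx
      rcases List.mem_cons.mp hx with rfl | hx
      · exact hnodecf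
      · exact i2 x (List.mem_append.mpr (Or.inl hx))
    · intro x hx
      rcases i4 x hx with h | h | h
      · rcases (hmemcomp' x).mp h with h | rfl
        · exact Or.inl h
        · exact Or.inr (Or.inl List.mem_cons_self)
      · rcases List.mem_append.mp h with h | h
        · exact Or.inr (Or.inl (List.mem_cons_of_mem _ h))
        · exact Or.inr (Or.inr ((hmemtv' x).mp ((PySem.Set.mem_inter _ _ x).mp h).2).1)
      · exact Or.inr (Or.inr ((hmemtv' x).mp h).1)
    · rw [i5, cig_filter_discard _ _ _ hnodecf]
    · intro c hc y hadj
      rcases i7 c hc y hadj with h | h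
      · exact Or.inl h
      · by_cases hy : y ∈ tv
        · have : y = node := by
            by_contra hne
            exact h ((hmemtv' y).mpr ⟨hy, hne⟩)
          subst this
          exact Or.inl hnodecf
        · exact Or.inr hy


theorem cig_eadj_symm {E : List (Int × Int)} {x y : Int} (h : EAdj E x y) : EAdj E y x := Or.symm h

theorem cig_econn_symm {E : List (Int × Int)} {x y : Int} (h : EConn E x y) : EConn E y x :=
  Relation.ReflTransGen.symmetric (fun _ _ hxy => cig_eadj_symm hxy) h

theorem cig_outer_spec (E : List (Int × Int)) (nbrs : PySem.Dict Int (PySem.Set Int))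
    (hN : ∀ x y, y ∈ nbrs.getD x PySem.Set.empty ↔ EAdj E x y) :
    ∀ (tv : PySem.Set Int) (comps : List (PySem.Set Int)),
    tv.Nodup →
    (∀ x, ENode E x ↔ (x ∈ tv ∨ ∃ C ∈ comps, x ∈ C)) →
    (∀ x ∈ tv, ∀ C ∈ comps, x ∉ C) →
    comps.Pairwise (fun C D => ∀ x ∈ C, x ∉ D) →
    (∀ C ∈ comps, C ≠ [] ∧ C.Nodup ∧ (∀ x ∈ C, ENode E x) ∧
      (∀ x ∈ C, ∀ y ∈ C, EConn E x y) ∧ (∀ x ∈ C, ∀ y, EAdj E x y → y ∈ C)) →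
    GoodPart E (cigOuter nbrs tv comps) := by
  intro tv comps
  fun_induction cigOuter nbrs tv comps with
  | case1 comps =>
    intro _ hcov _ hpw hprops
    refine ⟨hprops, ?_, hpw⟩
    intro x hx
    rcases (hcov x).mp hx with h | h
    · cases h
    · exact h
  | case2 s tvRest comps r ih =>
    intro htvnd hcov hdisjtv hpw hprops
    obtain ⟨i1, i2, i3, i4, i5, i6, i7⟩ :=
      cig_bfs_spec E nbrs hN s [s] PySem.Set.empty tvRest
        (by intro x hx; rw [List.mem_singleton] at hx; subst hx; exact Relation.ReflTransGen.refl)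
        (by intro x hx; cases hx)
        (by intro c hc; cases hc)
        (by intro x _ hx; cases hx)
        (List.Nodup.of_cons htvnd)
        List.nodup_nil
    have hscf : s ∈ r.1 := i2 s List.mem_cons_self
    have hcfsub : ∀ x ∈ r.1, x = s ∨ x ∈ tvRest := by
      intro x hx
      rcases i4 x hx with h | h | h
      · cases h
      · rcases List.mem_cons.mp h with rfl | h
        · exact Or.inl rfl
        · cases h
      · exact Or.inr h
    have hmemtf : ∀ x, x ∈ r.2 ↔ x ∈ tvRest ∧ x ∉ r.1 := by
      intro x
      rw [i5, List.mem_filter]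
      constructor
      · rintro ⟨h1, h2⟩
        refine ⟨h1, fun hm => ?_⟩
        rw [(PySem.Set.contains_iff _ x).mpr hm] at h2
        cases h2
      · rintro ⟨h1, h2⟩
        refine ⟨h1, ?_⟩
        cases hc : PySem.Set.contains r.1 x with
        | true => exact absurd ((PySem.Set.contains_iff _ x).mp hc) h2
        | false => rfl
    apply ih
    · rw [i5]; exact List.Nodup.filter _ (List.Nodup.of_cons htvnd)
    · intro x
      constructor
      · intro hx
        rcases (hcov x).mp hx with h | h
        · rcases List.mem_cons.mp h with rfl | h
          · exact Or.inr ⟨r.1, by simp, hscf⟩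
          · by_cases hxc : x ∈ r.1
            · exact Or.inr ⟨r.1, by simp, hxc⟩
            · exact Or.inl ((hmemtf x).mpr ⟨h, hxc⟩)
        · obtain ⟨C, hC, hxC⟩ := h
          exact Or.inr ⟨C, by simp [hC], hxC⟩
      · intro hx
        rcases hx with h | ⟨C, hC, hxC⟩
        · exact (hcov x).mpr (Or.inl (List.mem_cons_of_mem _ ((hmemtf x).mp h).1))
        · rcases List.mem_append.mp hC with hC | hC
          · exact (hcov x).mpr (Or.inr ⟨C, hC, hxC⟩)
          · rcases List.mem_singleton.mp hC with rfl
            rcases hcfsub x hxC with rfl | h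
            · exact (hcov x).mpr (Or.inl List.mem_cons_self)
            · exact (hcov x).mpr (Or.inl (List.mem_cons_of_mem _ h))
    · intro x hx C hC
      obtain ⟨hxtv, hxcf⟩ := (hmemtf x).mp hx
      rcases List.mem_append.mp hC with hC | hC
      · exact hdisjtv x (List.mem_cons_of_mem _ hxtv) C hC
      · rcases List.mem_singleton.mp hC with rfl
        exact hxcf
    · rw [List.pairwise_append]
      refine ⟨hpw, List.pairwise_singleton _ _, ?_⟩
      intro C hC D hD x hxC hxD
      rcases List.mem_singleton.mp hD with rfl
      rcases hcfsub x hxD with rfl | h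
      · exact hdisjtv x List.mem_cons_self C hC hxC
      · exact hdisjtv x (List.mem_cons_of_mem _ h) C hC hxC
    · intro C hC
      rcases List.mem_append.mp hC with hC | hC
      · exact hprops C hC
      · rcases List.mem_singleton.mp hC with rfl
        refine ⟨List.ne_nil_of_mem hscf, i6, ?_, ?_, ?_⟩
        · intro x hx
          rcases hcfsub x hx with rfl | h
          · exact (hcov x).mpr (Or.inl List.mem_cons_self)
          · exact (hcov x).mpr (Or.inl (List.mem_cons_of_mem _ h))
        · intro x hx y hy
          exact Relation.ReflTransGen.trans (cig_econn_symm (i3 x hx)) (i3 y hy)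
        · intro c hc y hadj
          rcases i7 c hc y hadj with h | h
          · exact h
          · have hyn : ENode E y := ⟨c, cig_eadj_symm hadj⟩
            rcases (hcov y).mp hyn with hy | hy
            · rcases List.mem_cons.mp hy with rfl | hy
              · exact hscf
              · exact absurd hy h
            · obtain ⟨D, hD, hyD⟩ := hy
              obtain ⟨_, _, _, _, hclD⟩ := hprops D hD
              have hcD : c ∈ D := hclD y hyD c (cig_eadj_symm hadj)
              have : c ∉ D := by
                rcases hcfsub c hc with rfl | hcc
                · exact hdisjtv c List.mem_cons_self D hD
                · exact hdisjtv c (List.mem_cons_of_mem _ hcc) D hD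
              exact absurd hcD this


theorem cig_A_good (gb : List (List Int)) :
    GoodPart (cigEdges gb) (cigOuter (cigNbrs gb) (PySem.Set.ofList (cigNbrs gb).keys) []) := by
  apply cig_outer_spec (cigEdges gb) (cigNbrs gb) (cigNbrs_getD gb)
  · exact PySem.Set.nodup_ofList _
  · intro x
    rw [PySem.Set.mem_ofList, cigNbrs_keys]
    simp
  · simp
  · simp
  · simp

theorem dict_get?_erase {ν : Type} (d : PySem.Dict Int ν) (k k' : Int) :
    (d.erase k).get? k' = if k' = k then none else d.get? k' := by
  obtain ⟨l⟩ := d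
  simp only [PySem.Dict.erase, PySem.Dict.get?]
  induction l with
  | nil => simp
  | cons p l ih =>
    by_cases hp : p.1 = k
    · simp only [List.filter_cons]
      have : (!p.1 == k) = false := by simp [hp]
      rw [this]
      simp only [Bool.false_eq_true, if_false]
      rw [ih]
      by_cases hk : k' = k
      · simp [hk]
      · have : (p.1 == k') = false := by simp [hp, hk]; omega
        simp [List.find?_cons, this, hk]
    · simp only [List.filter_cons]
      have : (!p.1 == k) = true := by simp [hp]
      rw [this]
      simp only [if_true]
      by_cases hpk : p.1 = k'
      · simp [List.find?_cons, hpk]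
        intro h; exact absurd h.symm (by rw [← hpk] at h ⊢; exact fun hh => hp (by omega))
      · have hb : (p.1 == k') = false := by simp [hpk]
        simp only [List.find?_cons, hb]
        exact ih

theorem dict_nodup_keys_erase {ν : Type} (d : PySem.Dict Int ν) (k : Int)
    (h : d.keys.Nodup) : (d.erase k).keys.Nodup := by
  obtain ⟨l⟩ := d
  simp only [PySem.Dict.erase, PySem.Dict.keys] at *
  exact List.Nodup.sublist (List.Sublist.map _ List.filter_sublist) h

theorem dict_get?_foldl_insert_const (l : List Int) (c : Int) :
    ∀ (d : PySem.Dict Int Int) (y : Int),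
    (l.foldl (fun d x => d.insert x c) d).get? y = if y ∈ l then some c else d.get? y := by
  induction l with
  | nil => simp
  | cons x l ih =>
    intro d y
    rw [List.foldl_cons, ih]
    by_cases hy : y ∈ l
    · simp [hy]
    · simp only [hy, if_false, List.mem_cons]
      rw [PySem.Dict.get?_insert]
      by_cases hyx : y = x <;> simp [hyx, hy]

theorem EAdj_snoc {F : List (Int × Int)} {a b x y : Int} :
    EAdj (F ++ [(a, b)]) x y ↔ EAdj F x y ∨ (x = a ∧ y = b) ∨ (x = b ∧ y = a) := by
  simp only [EAdj, List.mem_append, List.mem_singleton, Prod.mk.injEq]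
  tauto

theorem ENode_snoc {F : List (Int × Int)} {a b x : Int} :
    ENode (F ++ [(a, b)]) x ↔ ENode F x ∨ x = a ∨ x = b := by
  constructor
  · rintro ⟨y, hy⟩
    rcases EAdj_snoc.mp hy with h | ⟨rfl, _⟩ | ⟨rfl, _⟩
    · exact Or.inl ⟨y, h⟩
    · exact Or.inr (Or.inl rfl)
    · exact Or.inr (Or.inr rfl)
  · rintro (⟨y, hy⟩ | rfl | rfl)
    · exact ⟨y, EAdj_snoc.mpr (Or.inl hy)⟩
    · exact ⟨b, EAdj_snoc.mpr (Or.inr (Or.inl ⟨rfl, rfl⟩))⟩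
    · exact ⟨a, EAdj_snoc.mpr (Or.inr (Or.inr ⟨rfl, rfl⟩))⟩

theorem EConn_snoc_mono {F : List (Int × Int)} {a b x y : Int} (h : EConn F x y) :
    EConn (F ++ [(a, b)]) x y :=
  Relation.ReflTransGen.mono (fun _ _ hadj => EAdj_snoc.mpr (Or.inl hadj)) h

theorem EConn_snoc_ab {F : List (Int × Int)} (a b : Int) : EConn (F ++ [(a, b)]) a b :=
  Relation.ReflTransGen.single (EAdj_snoc.mpr (Or.inr (Or.inl ⟨rfl, rfl⟩)))

theorem cig_conn_anchor {E : List (Int × Int)} {C : List Int} {z : Int}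
    (h : ∀ x ∈ C, EConn E x z) : ∀ x ∈ C, ∀ y ∈ C, EConn E x y :=
  fun x hx y hy => (h x hx).trans (cig_econn_symm (h y hy))

def InvB (F : List (Int × Int))
    (st : PySem.Dict Int Int × PySem.Dict Int (PySem.Set Int) × Int) : Prop :=
  st.2.1.keys.Nodup ∧
  (∀ x k, st.1.get? x = some k → ∃ C, st.2.1.get? k = some C ∧ x ∈ C) ∧
  (∀ k C, st.2.1.get? k = some C → ∀ x ∈ C, st.1.get? x = some k) ∧
  (∀ x, (st.1.get? x).isSome ↔ ENode F x) ∧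
  (∀ k C, st.2.1.get? k = some C → C ≠ [] ∧ C.Nodup ∧ ∀ x ∈ C, ∀ y ∈ C, EConn F x y) ∧
  (∀ p ∈ F, ∃ k C, st.2.1.get? k = some C ∧ p.1 ∈ C ∧ p.2 ∈ C) ∧
  (∀ k C, st.2.1.get? k = some C → k < st.2.2)

theorem cig_step_nn (F : List (Int × Int)) (a b : Int)
    (compOf : PySem.Dict Int Int) (mems : PySem.Dict Int (PySem.Set Int)) (fresh : Int)
    (hInv : InvB F (compOf, mems, fresh))
    (ha : compOf.get? a = none) (hb : compOf.get? b = none) :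
    InvB (F ++ [(a, b)])
      ((compOf.insert a fresh).insert b fresh,
       mems.insert fresh (PySem.Set.add (PySem.Set.add PySem.Set.empty a) b), fresh + 1) := by
  obtain ⟨h1, h2, h3, h4, h5, h6, h7⟩ := hInv
  have hC : ∀ x, x ∈ PySem.Set.add (PySem.Set.add PySem.Set.empty a) b ↔ x = a ∨ x = b := by
    intro x
    rw [PySem.Set.mem_add, PySem.Set.mem_add]
    simp [PySem.Set.empty_eq]
  have hmemsFresh : mems.get? fresh = none := by
    cases hf : mems.get? fresh with
    | none => rfl
    | some C => exact absurd (h7 fresh C hf) (lt_irrefl fresh)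
  have hm' : ∀ k, (mems.insert fresh (PySem.Set.add (PySem.Set.add PySem.Set.empty a) b)).get? k
      = if k = fresh then some (PySem.Set.add (PySem.Set.add PySem.Set.empty a) b)
        else mems.get? k := fun k => by rw [PySem.Dict.get?_insert]
  have hc' : ∀ x, ((compOf.insert a fresh).insert b fresh).get? x
      = if x = b ∨ x = a then some fresh else compOf.get? x := by
    intro x
    rw [PySem.Dict.get?_insert, PySem.Dict.get?_insert]
    by_cases hxb : x = b <;> by_cases hxa : x = a <;> simp [hxa, hxb]
  refine ⟨?_, ?_, ?_, ?_, ?_, ?_, ?_⟩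
  · exact PySem.Dict.nodup_keys_insert mems fresh _ h1
  · intro x k hxk
    rw [hc'] at hxk
    split_ifs at hxk with hx
    · cases hxk
      refine ⟨_, by rw [hm']; simp, (hC x).mpr hx.symm⟩
    · obtain ⟨C, hkC, hxC⟩ := h2 x k hxk
      have hkf : k ≠ fresh := fun h => absurd (h ▸ h7 k C hkC) (lt_irrefl fresh)
      exact ⟨C, by rw [hm', if_neg hkf]; exact hkC, hxC⟩
  · intro k C hkC x hxC
    rw [hm'] at hkC
    rw [hc']
    split_ifs at hkC with hk
    · cases hkC
      rcases (hC x).mp hxC with rfl | rfl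
      · rw [if_pos (Or.inr rfl)]; rw [hk]
      · rw [if_pos (Or.inl rfl)]; rw [hk]
    · have := h3 k C hkC x hxC
      rw [if_neg ?_]
      · exact this
      · rintro (rfl | rfl)
        · rw [hb] at this; cases this
        · rw [ha] at this; cases this
  · intro x
    rw [hc', ENode_snoc]
    split_ifs with hx
    · simp only [Option.isSome_some, true_iff]
      rcases hx with rfl | rfl
      · exact Or.inr (Or.inr rfl)
      · exact Or.inr (Or.inl rfl)
    · rw [h4 x]
      constructor
      · exact Or.inl
      · rintro (h | rfl | rfl)
        · exact h
        · exact absurd (Or.inr rfl) hx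
        · exact absurd (Or.inl rfl) hx
  · intro k C hkC
    rw [hm'] at hkC
    split_ifs at hkC with hk
    · cases hkC
      refine ⟨List.ne_nil_of_mem ((hC b).mpr (Or.inr rfl)), ?_, ?_⟩
      · exact PySem.Set.nodup_add _ b (PySem.Set.nodup_add _ a List.nodup_nil)
      · have hconn : ∀ x ∈ PySem.Set.add (PySem.Set.add PySem.Set.empty a) b,
            EConn (F ++ [(a, b)]) x b := by
          intro x hx
          rcases (hC x).mp hx with rfl | rfl
          · exact EConn_snoc_ab x b
          · exact Relation.ReflTransGen.refl
        exact cig_conn_anchor hconn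
    · obtain ⟨hne, hnd, hcn⟩ := h5 k C hkC
      exact ⟨hne, hnd, fun x hx y hy => EConn_snoc_mono (hcn x hx y hy)⟩
  · intro p hp
    rcases List.mem_append.mp hp with hp | hp
    · obtain ⟨k, C, hkC, hp1, hp2⟩ := h6 p hp
      have hkf : k ≠ fresh := fun h => absurd (h ▸ h7 k C hkC) (lt_irrefl fresh)
      exact ⟨k, C, by rw [hm', if_neg hkf]; exact hkC, hp1, hp2⟩
    · rcases List.mem_singleton.mp hp with rfl
      refine ⟨fresh, PySem.Set.add (PySem.Set.add PySem.Set.empty a) b,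
        by rw [hm', if_pos rfl], ?_, ?_⟩
      · exact (hC a).mpr (Or.inl rfl)
      · exact (hC b).mpr (Or.inr rfl)
  · intro k C hkC
    show k < fresh + 1
    rw [hm'] at hkC
    split_ifs at hkC with hk
    · omega
    · have := h7 k C hkC
      have : k < fresh := this
      omega

theorem cig_step_ns (F : List (Int × Int)) (a b cb : Int)
    (compOf : PySem.Dict Int Int) (mems : PySem.Dict Int (PySem.Set Int)) (fresh : Int)
    (hInv : InvB F (compOf, mems, fresh))
    (ha : compOf.get? a = none) (hb : compOf.get? b = some cb) :
    InvB (F ++ [(a, b)])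
      (compOf.insert a cb, mems.modify cb PySem.Set.empty (fun s => PySem.Set.add s a), fresh) := by
  obtain ⟨h1, h2, h3, h4, h5, h6, h7⟩ := hInv
  obtain ⟨Cb, hCb, hbCb⟩ := h2 b cb hb
  have hgetD : mems.getD cb PySem.Set.empty = Cb := by
    rw [PySem.Dict.getD_eq_get?_getD, hCb]; rfl
  have hm' : ∀ k, (mems.modify cb PySem.Set.empty (fun s => PySem.Set.add s a)).get? k
      = if k = cb then some (PySem.Set.add Cb a) else mems.get? k := by
    intro k
    rw [PySem.Dict.modify.eq_1, hgetD, PySem.Dict.get?_insert]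
  have hc' : ∀ x, (compOf.insert a cb).get? x = if x = a then some cb else compOf.get? x :=
    fun x => by rw [PySem.Dict.get?_insert]
  have hmemsInj : ∀ k C C', mems.get? k = some C → mems.get? k = some C' → C = C' := by
    intro k C C' hC hC'; rw [hC] at hC'; exact (Option.some_inj.mp hC')
  obtain ⟨hCbne, hCbnd, hCbconn⟩ := h5 cb Cb hCb
  refine ⟨?_, ?_, ?_, ?_, ?_, ?_, ?_⟩
  · show (mems.modify cb PySem.Set.empty (fun s => PySem.Set.add s a)).keys.Nodup
    rw [PySem.Dict.keys_modify]
    exact PySem.Dict.nodup_keys_insert mems cb _ h1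
  · intro x k hxk
    rw [hc'] at hxk
    split_ifs at hxk with hx
    · cases hxk
      exact ⟨_, by rw [hm', if_pos rfl], (PySem.Set.mem_add Cb a x).mpr (Or.inr hx)⟩
    · obtain ⟨C, hkC, hxC⟩ := h2 x k hxk
      by_cases hk : k = cb
      · subst hk
        have := hmemsInj k C Cb hkC hCb
        subst this
        exact ⟨_, by rw [hm', if_pos rfl], (PySem.Set.mem_add C a x).mpr (Or.inl hxC)⟩
      · exact ⟨C, by rw [hm', if_neg hk]; exact hkC, hxC⟩
  · intro k C hkC x hxC
    rw [hm'] at hkC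
    rw [hc']
    split_ifs at hkC with hk
    · cases hkC
      rcases (PySem.Set.mem_add Cb a x).mp hxC with hx | rfl
      · have := h3 cb Cb hCb x hx
        rw [if_neg, hk]
        · exact this
        · rintro rfl; rw [ha] at this; cases this
      · rw [if_pos rfl, hk]
    · have := h3 k C hkC x hxC
      rw [if_neg]
      · exact this
      · rintro rfl; rw [ha] at this; cases this
  · intro x
    rw [hc', ENode_snoc]
    split_ifs with hx
    · simp only [Option.isSome_some, true_iff]
      exact Or.inr (Or.inl hx)
    · rw [h4 x]
      constructor
      · exact Or.inl
      · rintro (h | rfl | rfl)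
        · exact h
        · exact absurd rfl hx
        · exact (h4 x).mp (by rw [hb]; rfl)
  · intro k C hkC
    rw [hm'] at hkC
    split_ifs at hkC with hk
    · cases hkC
      refine ⟨List.ne_nil_of_mem ((PySem.Set.mem_add Cb a a).mpr (Or.inr rfl)),
        PySem.Set.nodup_add Cb a hCbnd, ?_⟩
      have hanchor : ∀ x ∈ PySem.Set.add Cb a, EConn (F ++ [(a, b)]) x b := by
        intro x hx
        rcases (PySem.Set.mem_add Cb a x).mp hx with hx | rfl
        · exact EConn_snoc_mono (hCbconn x hx b hbCb)
        · exact EConn_snoc_ab x b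
      exact cig_conn_anchor hanchor
    · obtain ⟨hne, hnd, hcn⟩ := h5 k C hkC
      exact ⟨hne, hnd, fun x hx y hy => EConn_snoc_mono (hcn x hx y hy)⟩
  · intro p hp
    rcases List.mem_append.mp hp with hp | hp
    · obtain ⟨k, C, hkC, hp1, hp2⟩ := h6 p hp
      by_cases hk : k = cb
      · subst hk
        have := hmemsInj k C Cb hkC hCb
        subst this
        exact ⟨k, PySem.Set.add C a, by rw [hm', if_pos rfl],
          (PySem.Set.mem_add C a _).mpr (Or.inl hp1), (PySem.Set.mem_add C a _).mpr (Or.inl hp2)⟩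
      · exact ⟨k, C, by rw [hm', if_neg hk]; exact hkC, hp1, hp2⟩
    · rcases List.mem_singleton.mp hp with rfl
      exact ⟨cb, PySem.Set.add Cb a, by rw [hm', if_pos rfl],
        (PySem.Set.mem_add Cb a _).mpr (Or.inr rfl), (PySem.Set.mem_add Cb a _).mpr (Or.inl hbCb)⟩
  · intro k C hkC
    show k < fresh
    rw [hm'] at hkC
    split_ifs at hkC with hk
    · rw [hk]; exact h7 cb Cb hCb
    · exact h7 k C hkC

theorem cig_step_sn (F : List (Int × Int)) (a b ca : Int)
    (compOf : PySem.Dict Int Int) (mems : PySem.Dict Int (PySem.Set Int)) (fresh : Int)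
    (hInv : InvB F (compOf, mems, fresh))
    (ha : compOf.get? a = some ca) (hb : compOf.get? b = none) :
    InvB (F ++ [(a, b)])
      (compOf.insert b ca, mems.modify ca PySem.Set.empty (fun s => PySem.Set.add s b), fresh) := by
  obtain ⟨h1, h2, h3, h4, h5, h6, h7⟩ := hInv
  obtain ⟨Ca, hCa, haCa⟩ := h2 a ca ha
  have hgetD : mems.getD ca PySem.Set.empty = Ca := by
    rw [PySem.Dict.getD_eq_get?_getD, hCa]; rfl
  have hm' : ∀ k, (mems.modify ca PySem.Set.empty (fun s => PySem.Set.add s b)).get? k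
      = if k = ca then some (PySem.Set.add Ca b) else mems.get? k := by
    intro k
    rw [PySem.Dict.modify.eq_1, hgetD, PySem.Dict.get?_insert]
  have hc' : ∀ x, (compOf.insert b ca).get? x = if x = b then some ca else compOf.get? x :=
    fun x => by rw [PySem.Dict.get?_insert]
  have hmemsInj : ∀ k C C', mems.get? k = some C → mems.get? k = some C' → C = C' := by
    intro k C C' hC hC'; rw [hC] at hC'; exact (Option.some_inj.mp hC')
  obtain ⟨hCane, hCand, hCaconn⟩ := h5 ca Ca hCa
  refine ⟨?_, ?_, ?_, ?_, ?_, ?_, ?_⟩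
  · show (mems.modify ca PySem.Set.empty (fun s => PySem.Set.add s b)).keys.Nodup
    rw [PySem.Dict.keys_modify]
    exact PySem.Dict.nodup_keys_insert mems ca _ h1
  · intro x k hxk
    rw [hc'] at hxk
    split_ifs at hxk with hx
    · cases hxk
      exact ⟨_, by rw [hm', if_pos rfl], (PySem.Set.mem_add Ca b x).mpr (Or.inr hx)⟩
    · obtain ⟨C, hkC, hxC⟩ := h2 x k hxk
      by_cases hk : k = ca
      · subst hk
        have := hmemsInj k C Ca hkC hCa
        subst this
        exact ⟨_, by rw [hm', if_pos rfl], (PySem.Set.mem_add C b x).mpr (Or.inl hxC)⟩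
      · exact ⟨C, by rw [hm', if_neg hk]; exact hkC, hxC⟩
  · intro k C hkC x hxC
    rw [hm'] at hkC
    rw [hc']
    split_ifs at hkC with hk
    · cases hkC
      rcases (PySem.Set.mem_add Ca b x).mp hxC with hx | rfl
      · have := h3 ca Ca hCa x hx
        rw [if_neg, hk]
        · exact this
        · rintro rfl; rw [hb] at this; cases this
      · rw [if_pos rfl, hk]
    · have := h3 k C hkC x hxC
      rw [if_neg]
      · exact this
      · rintro rfl; rw [hb] at this; cases this
  · intro x
    rw [hc', ENode_snoc]
    split_ifs with hx
    · simp only [Option.isSome_some, true_iff]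
      exact Or.inr (Or.inr hx)
    · rw [h4 x]
      constructor
      · exact Or.inl
      · rintro (h | rfl | rfl)
        · exact h
        · exact (h4 x).mp (by rw [ha]; rfl)
        · exact absurd rfl hx
  · intro k C hkC
    rw [hm'] at hkC
    split_ifs at hkC with hk
    · cases hkC
      refine ⟨List.ne_nil_of_mem ((PySem.Set.mem_add Ca b b).mpr (Or.inr rfl)),
        PySem.Set.nodup_add Ca b hCand, ?_⟩
      have hanchor : ∀ x ∈ PySem.Set.add Ca b, EConn (F ++ [(a, b)]) x a := by
        intro x hx
        rcases (PySem.Set.mem_add Ca b x).mp hx with hx | rfl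
        · exact EConn_snoc_mono (hCaconn x hx a haCa)
        · exact cig_econn_symm (EConn_snoc_ab a x)
      exact cig_conn_anchor hanchor
    · obtain ⟨hne, hnd, hcn⟩ := h5 k C hkC
      exact ⟨hne, hnd, fun x hx y hy => EConn_snoc_mono (hcn x hx y hy)⟩
  · intro p hp
    rcases List.mem_append.mp hp with hp | hp
    · obtain ⟨k, C, hkC, hp1, hp2⟩ := h6 p hp
      by_cases hk : k = ca
      · subst hk
        have := hmemsInj k C Ca hkC hCa
        subst this
        exact ⟨k, PySem.Set.add C b, by rw [hm', if_pos rfl],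
          (PySem.Set.mem_add C b _).mpr (Or.inl hp1), (PySem.Set.mem_add C b _).mpr (Or.inl hp2)⟩
      · exact ⟨k, C, by rw [hm', if_neg hk]; exact hkC, hp1, hp2⟩
    · rcases List.mem_singleton.mp hp with rfl
      exact ⟨ca, PySem.Set.add Ca b, by rw [hm', if_pos rfl],
        (PySem.Set.mem_add Ca b _).mpr (Or.inl haCa), (PySem.Set.mem_add Ca b _).mpr (Or.inr rfl)⟩
  · intro k C hkC
    show k < fresh
    rw [hm'] at hkC
    split_ifs at hkC with hk
    · rw [hk]; exact h7 ca Ca hCa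
    · exact h7 k C hkC

theorem cig_step_eq (F : List (Int × Int)) (a b c : Int)
    (compOf : PySem.Dict Int Int) (mems : PySem.Dict Int (PySem.Set Int)) (fresh : Int)
    (hInv : InvB F (compOf, mems, fresh))
    (ha : compOf.get? a = some c) (hb : compOf.get? b = some c) :
    InvB (F ++ [(a, b)]) (compOf, mems, fresh) := by
  obtain ⟨h1, h2, h3, h4, h5, h6, h7⟩ := hInv
  obtain ⟨Ca, hCa, haCa⟩ := h2 a c ha
  obtain ⟨Cb, hCb, hbCb⟩ := h2 b c hb
  have hCab : Ca = Cb := by rw [hCa] at hCb; exact Option.some_inj.mp hCb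
  subst hCab
  refine ⟨h1, h2, h3, ?_, ?_, ?_, h7⟩
  · intro x
    rw [ENode_snoc, ← h4 x]
    constructor
    · exact Or.inl
    · rintro (h | rfl | rfl)
      · exact h
      · rw [ha]; rfl
      · rw [hb]; rfl
  · intro k C hkC
    obtain ⟨hne, hnd, hcn⟩ := h5 k C hkC
    exact ⟨hne, hnd, fun x hx y hy => EConn_snoc_mono (hcn x hx y hy)⟩
  · intro p hp
    rcases List.mem_append.mp hp with hp | hp
    · obtain ⟨k, C, hkC, hp1, hp2⟩ := h6 p hp
      exact ⟨k, C, hkC, hp1, hp2⟩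
    · rcases List.mem_singleton.mp hp with rfl
      exact ⟨c, Ca, hCa, haCa, hbCb⟩

theorem cig_step_merge (F : List (Int × Int)) (a b ca cb : Int)
    (compOf : PySem.Dict Int Int) (mems : PySem.Dict Int (PySem.Set Int)) (fresh : Int)
    (hInv : InvB F (compOf, mems, fresh))
    (ha : compOf.get? a = some ca) (hb : compOf.get? b = some cb) (hab : ca ≠ cb) :
    InvB (F ++ [(a, b)])
      ((mems.getD cb PySem.Set.empty).foldl (fun d x => d.insert x ca) compOf,
       (mems.modify ca PySem.Set.empty
          (fun s => PySem.Set.union s (mems.getD cb PySem.Set.empty))).erase cb,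
       fresh) := by
  obtain ⟨h1, h2, h3, h4, h5, h6, h7⟩ := hInv
  obtain ⟨Ca, hCa, haCa⟩ := h2 a ca ha
  obtain ⟨Cb, hCb, hbCb⟩ := h2 b cb hb
  have hgetDb : mems.getD cb PySem.Set.empty = Cb := by
    rw [PySem.Dict.getD_eq_get?_getD, hCb]; rfl
  have hgetDa : mems.getD ca PySem.Set.empty = Ca := by
    rw [PySem.Dict.getD_eq_get?_getD, hCa]; rfl
  have hmemsInj : ∀ k C C', mems.get? k = some C → mems.get? k = some C' → C = C' := by
    intro k C C' hC hC'; rw [hC] at hC'; exact Option.some_inj.mp hC'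
  obtain ⟨hCane, hCand, hCaconn⟩ := h5 ca Ca hCa
  obtain ⟨hCbne, hCbnd, hCbconn⟩ := h5 cb Cb hCb
  have hdisjab : ∀ x, x ∈ Ca → x ∈ Cb → False := by
    intro x hxa hxb
    have t1 := h3 ca Ca hCa x hxa
    have t2 := h3 cb Cb hCb x hxb
    rw [t1] at t2
    exact hab (Option.some_inj.mp t2)
  have hmemU : ∀ x, x ∈ PySem.Set.union Ca Cb ↔ x ∈ Ca ∨ x ∈ Cb :=
    fun x => PySem.Set.mem_union Ca Cb x
  have hm' : ∀ k, ((mems.modify ca PySem.Set.empty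
        (fun s => PySem.Set.union s (mems.getD cb PySem.Set.empty))).erase cb).get? k
      = if k = cb then none else if k = ca then some (PySem.Set.union Ca Cb) else mems.get? k := by
    intro k
    rw [dict_get?_erase]
    by_cases hk : k = cb
    · rw [if_pos hk, if_pos hk]
    · rw [if_neg hk, if_neg hk, PySem.Dict.modify.eq_1, hgetDa, hgetDb, PySem.Dict.get?_insert]
  have hc' : ∀ x, ((mems.getD cb PySem.Set.empty).foldl (fun d x => d.insert x ca) compOf).get? x
      = if x ∈ Cb then some ca else compOf.get? x := by
    intro x
    rw [hgetDb, dict_get?_foldl_insert_const]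
  refine ⟨?_, ?_, ?_, ?_, ?_, ?_, ?_⟩
  · show ((mems.modify ca PySem.Set.empty
        (fun s => PySem.Set.union s (mems.getD cb PySem.Set.empty))).erase cb).keys.Nodup
    apply dict_nodup_keys_erase
    rw [PySem.Dict.keys_modify]
    exact PySem.Dict.nodup_keys_insert mems ca _ h1
  · intro x k hxk
    rw [hc'] at hxk
    split_ifs at hxk with hx
    · cases hxk
      exact ⟨_, by rw [hm', if_neg hab, if_pos rfl],
        (hmemU x).mpr (Or.inr hx)⟩
    · obtain ⟨C, hkC, hxC⟩ := h2 x k hxk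
      by_cases hkcb : k = cb
      · subst hkcb
        have := hmemsInj k C Cb hkC hCb
        subst this
        exact absurd hxC hx
      · by_cases hkca : k = ca
        · subst hkca
          have := hmemsInj k C Ca hkC hCa
          subst this
          exact ⟨_, by rw [hm', if_neg hkcb, if_pos rfl], (hmemU x).mpr (Or.inl hxC)⟩
        · exact ⟨C, by rw [hm', if_neg hkcb, if_neg hkca]; exact hkC, hxC⟩
  · intro k C hkC x hxC
    rw [hm'] at hkC
    rw [hc']
    by_cases hkcb : k = cb
    · rw [if_pos hkcb] at hkC; cases hkC
    · rw [if_neg hkcb] at hkC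
      by_cases hkca : k = ca
      · rw [if_pos hkca] at hkC
        cases hkC
        rcases (hmemU x).mp hxC with hx | hx
        · rw [if_neg (fun hxb => hdisjab x hx hxb), hkca]
          exact h3 ca Ca hCa x hx
        · rw [if_pos hx, hkca]
      · rw [if_neg hkca] at hkC
        have := h3 k C hkC x hxC
        rw [if_neg]
        · exact this
        · intro hxb
          have t2 := h3 cb Cb hCb x hxb
          rw [this] at t2
          exact hkcb (Option.some_inj.mp t2)
  · intro x
    rw [hc', ENode_snoc]
    split_ifs with hx
    · simp only [Option.isSome_some, true_iff]
      exact Or.inl ((h4 x).mp (by rw [h3 cb Cb hCb x hx]; rfl))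
    · rw [h4 x]
      constructor
      · exact Or.inl
      · rintro (h | rfl | rfl)
        · exact h
        · exact (h4 x).mp (by rw [ha]; rfl)
        · exact (h4 x).mp (by rw [hb]; rfl)
  · intro k C hkC
    rw [hm'] at hkC
    by_cases hkcb : k = cb
    · rw [if_pos hkcb] at hkC; cases hkC
    · rw [if_neg hkcb] at hkC
      by_cases hkca : k = ca
      · rw [if_pos hkca] at hkC
        cases hkC
        refine ⟨List.ne_nil_of_mem ((hmemU a).mpr (Or.inl haCa)),
          PySem.Set.nodup_union Ca Cb hCand, ?_⟩
        have hba : EConn (F ++ [(a, b)]) b a := cig_econn_symm (EConn_snoc_ab a b)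
        have hanchor : ∀ x ∈ PySem.Set.union Ca Cb, EConn (F ++ [(a, b)]) x a := by
          intro x hx
          rcases (hmemU x).mp hx with hx | hx
          · exact EConn_snoc_mono (hCaconn x hx a haCa)
          · exact (EConn_snoc_mono (hCbconn x hx b hbCb)).trans hba
        exact cig_conn_anchor hanchor
      · rw [if_neg hkca] at hkC
        obtain ⟨hne, hnd, hcn⟩ := h5 k C hkC
        exact ⟨hne, hnd, fun x hx y hy => EConn_snoc_mono (hcn x hx y hy)⟩
  · intro p hp
    rcases List.mem_append.mp hp with hp | hp
    · obtain ⟨k, C, hkC, hp1, hp2⟩ := h6 p hp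
      by_cases hkcb : k = cb
      · subst hkcb
        have := hmemsInj k C Cb hkC hCb
        subst this
        exact ⟨ca, _, by rw [hm', if_neg hab, if_pos rfl],
          (hmemU _).mpr (Or.inr hp1), (hmemU _).mpr (Or.inr hp2)⟩
      · by_cases hkca : k = ca
        · subst hkca
          have := hmemsInj k C Ca hkC hCa
          subst this
          exact ⟨k, _, by rw [hm', if_neg hkcb, if_pos rfl],
            (hmemU _).mpr (Or.inl hp1), (hmemU _).mpr (Or.inl hp2)⟩
        · exact ⟨k, C, by rw [hm', if_neg hkcb, if_neg hkca]; exact hkC, hp1, hp2⟩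
    · rcases List.mem_singleton.mp hp with rfl
      exact ⟨ca, _, by rw [hm', if_neg hab, if_pos rfl],
        (hmemU _).mpr (Or.inl haCa), (hmemU _).mpr (Or.inr hbCb)⟩
  · intro k C hkC
    show k < fresh
    rw [hm'] at hkC
    by_cases hkcb : k = cb
    · rw [if_pos hkcb] at hkC; cases hkC
    · rw [if_neg hkcb] at hkC
      by_cases hkca : k = ca
      · rw [hkca]; exact h7 ca Ca hCa
      · rw [if_neg hkca] at hkC
        exact h7 k C hkC

theorem cig_fold_inv (gb : List (List Int)) :
    ∀ (F : List (Int × Int)) (st : PySem.Dict Int Int × PySem.Dict Int (PySem.Set Int) × Int),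
    InvB F st → InvB (F ++ cigEdges gb) (gb.foldl cigAltStep st) := by
  induction gb with
  | nil => intro F st h; simpa [cigEdges] using h
  | cons e gb ih =>
    intro F st h
    rw [List.foldl_cons]
    rcases he : PySem.List.pyGet? e 0 with _ | a <;> rcases he' : PySem.List.pyGet? e 1 with _ | b
    · have hstep : cigAltStep st e = st := by simp [cigAltStep, he, he']
      have hE : cigEdges (e :: gb) = cigEdges gb := by simp [cigEdges, he, he']
      rw [hstep, hE]; exact ih F st h
    · have hstep : cigAltStep st e = st := by simp [cigAltStep, he, he']
      have hE : cigEdges (e :: gb) = cigEdges gb := by simp [cigEdges, he, he']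
      rw [hstep, hE]; exact ih F st h
    · have hstep : cigAltStep st e = st := by simp [cigAltStep, he, he']
      have hE : cigEdges (e :: gb) = cigEdges gb := by simp [cigEdges, he, he']
      rw [hstep, hE]; exact ih F st h
    · have hE : cigEdges (e :: gb) = (a, b) :: cigEdges gb := by simp [cigEdges, he, he']
      rw [hE]
      have hassoc : F ++ (a, b) :: cigEdges gb = (F ++ [(a, b)]) ++ cigEdges gb := by simp
      rw [hassoc]
      obtain ⟨c, m, f⟩ := st
      have hstep : InvB (F ++ [(a, b)]) (cigAltStep (c, m, f) e) := by
        rcases hca : c.get? a with _ | ca <;> rcases hcb : c.get? b with _ | cb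
        · have hred : cigAltStep (c, m, f) e
              = ((c.insert a f).insert b f,
                 m.insert f (PySem.Set.add (PySem.Set.add PySem.Set.empty a) b), f + 1) := by
            simp [cigAltStep, he, he', hca, hcb]
          rw [hred]; exact cig_step_nn F a b c m f h hca hcb
        · have hred : cigAltStep (c, m, f) e
              = (c.insert a cb, m.modify cb PySem.Set.empty (fun s => PySem.Set.add s a), f) := by
            simp [cigAltStep, he, he', hca, hcb]
          rw [hred]; exact cig_step_ns F a b cb c m f h hca hcb
        · have hred : cigAltStep (c, m, f) e
              = (c.insert b ca, m.modify ca PySem.Set.empty (fun s => PySem.Set.add s b), f) := by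
            simp [cigAltStep, he, he', hca, hcb]
          rw [hred]; exact cig_step_sn F a b ca c m f h hca hcb
        · by_cases hee : ca = cb
          · subst hee
            have hred : cigAltStep (c, m, f) e = (c, m, f) := by
              simp [cigAltStep, he, he', hca, hcb]
            rw [hred]; exact cig_step_eq F a b ca c m f h hca hcb
          · have hred : cigAltStep (c, m, f) e
                = ((m.getD cb PySem.Set.empty).foldl (fun d x => d.insert x ca) c,
                   (m.modify ca PySem.Set.empty
                      (fun s => PySem.Set.union s (m.getD cb PySem.Set.empty))).erase cb, f) := by
              simp [cigAltStep, he, he', hca, hcb, hee]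
            rw [hred]; exact cig_step_merge F a b ca cb c m f h hca hcb hee
      exact ih _ _ hstep

theorem cig_inv_good (E : List (Int × Int))
    (st : PySem.Dict Int Int × PySem.Dict Int (PySem.Set Int) × Int)
    (h : InvB E st) : GoodPart E st.2.1.values := by
  obtain ⟨h1, h2, h3, h4, h5, h6, h7⟩ := h
  have hval : ∀ C, C ∈ st.2.1.values ↔ ∃ k, st.2.1.get? k = some C := by
    intro C
    rw [PySem.Dict.values.eq_1, List.mem_map]
    constructor
    · rintro ⟨p, hp, rfl⟩
      exact ⟨p.1, PySem.Dict.get?_of_mem_items _ hp h1⟩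
    · rintro ⟨k, hk⟩
      exact ⟨(k, C), (PySem.Dict.get?_eq_some_iff_mem_items _ k C h1).mp hk, rfl⟩
  have hclosed : ∀ C, (∃ k, st.2.1.get? k = some C) → ∀ x ∈ C, ∀ y, EAdj E x y → y ∈ C := by
    rintro C ⟨k, hk⟩ x hx y hadj
    have hxk := h3 k C hk x hx
    rcases hadj with hp | hp
    · obtain ⟨k', C', hk', hx', hy'⟩ := h6 (x, y) hp
      have := h3 k' C' hk' x hx'
      rw [hxk] at this
      have : k = k' := (Option.some_inj.mp this)
      subst this
      rw [hk] at hk'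
      exact (Option.some_inj.mp hk').symm ▸ hy'
    · obtain ⟨k', C', hk', hy', hx'⟩ := h6 (y, x) hp
      have := h3 k' C' hk' x hx'
      rw [hxk] at this
      have : k = k' := (Option.some_inj.mp this)
      subst this
      rw [hk] at hk'
      exact (Option.some_inj.mp hk').symm ▸ hy'
  refine ⟨?_, ?_, ?_⟩
  · intro C hC
    obtain ⟨k, hk⟩ := (hval C).mp hC
    obtain ⟨hne, hnd, hcn⟩ := h5 k C hk
    refine ⟨hne, hnd, ?_, hcn, hclosed C ⟨k, hk⟩⟩
    intro x hx
    exact (h4 x).mp (by rw [h3 k C hk x hx]; rfl)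
  · intro x hx
    have := (h4 x).mpr hx
    cases hcg : st.1.get? x with
    | none => rw [hcg] at this; cases this
    | some k =>
      obtain ⟨C, hkC, hxC⟩ := h2 x k hcg
      exact ⟨C, (hval C).mpr ⟨k, hkC⟩, hxC⟩
  · have hpw : st.2.1.items.Pairwise (fun p q => p.1 ≠ q.1) := by
      have := h1
      rw [PySem.Dict.keys.eq_1, List.nodup_iff_pairwise_ne] at this
      exact (List.pairwise_map).mp this
    have hpw2 : st.2.1.items.Pairwise (fun p q => ∀ x ∈ p.2, x ∉ q.2) := by
      refine hpw.imp_of_mem ?_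
      intro p q hp hq hne x hxp hxq
      have g1 : st.2.1.get? p.1 = some p.2 := PySem.Dict.get?_of_mem_items _ hp h1
      have g2 : st.2.1.get? q.1 = some q.2 := PySem.Dict.get?_of_mem_items _ hq h1
      have t1 := h3 p.1 p.2 g1 x hxp
      have t2 := h3 q.1 q.2 g2 x hxq
      rw [t1] at t2
      exact hne (Option.some_inj.mp t2)
    rw [PySem.Dict.values.eq_1]
    exact (List.pairwise_map).mpr hpw2

theorem cig_inv_init : InvB [] (PySem.Dict.empty, PySem.Dict.empty, (0 : Int)) := by
  refine ⟨?_, ?_, ?_, ?_, ?_, ?_, ?_⟩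
  · simpa using PySem.Dict.nodup_keys_empty (κ := Int) (ν := PySem.Set Int)
  · intro x k h; rw [PySem.Dict.get?_empty] at h; cases h
  · intro k C h; rw [PySem.Dict.get?_empty] at h; cases h
  · intro x
    rw [PySem.Dict.get?_empty]
    simp [ENode, EAdj]
  · intro k C h; rw [PySem.Dict.get?_empty] at h; cases h
  · intro p hp; cases hp
  · intro k C h; rw [PySem.Dict.get?_empty] at h; cases h

theorem cig_B_good (gb : List (List Int)) :
    GoodPart (cigEdges gb) ((gb.foldl cigAltStep (PySem.Dict.empty, PySem.Dict.empty, 0)).2.1.values) := by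
  have := cig_fold_inv gb [] (PySem.Dict.empty, PySem.Dict.empty, 0) cig_inv_init
  rw [List.nil_append] at this
  exact cig_inv_good (cigEdges gb) _ this

-- ===== VERDICT (by name: the statement is the Claim_ definition above) =====
theorem componentsInGraph_spec : Claim_equal_componentsInGraph := by
  intro gb _ _
  unfold Spec_componentsInGraph componentsInGraph componentsInGraph_alt
  apply pyMinMax_perm
  have hperm := goodpart_sizes_perm (cigEdges gb) _ _ (cig_A_good gb) (cig_B_good gb)
  simpa [PySem.Set.len_eq] using hperm
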